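-- pv_equiv track=rewrite | github.com/Seo-yul/algorithm | 9037.py | divide_action
-- ===== SOURCE A (Python) =====
-- def divide_action(list_pra, list_len) -> (list, tuple):
--     tmp_list = [0]*list_len
--     for i in range(list_len):
--         tmp_list[i] += list_pra[i] // 2
--         if i == list_len-1:
--             tmp_list[0] += list_pra[i] // 2
--         else:
--             tmp_list[i+1] += list_pra[i] // 2
--     return tmp_list
-- ===== SOURCE B (Python) =====
-- def divide_action(list_pra, list_len) -> (list, tuple):
--     # Staged whole-list version: take the floor-halves once, rotate that list
--     # right by one (the cyclic "give to successor" pass), then vector-add.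
--     halves = [list_pra[i] // 2 for i in range(list_len)]
--     rotated = halves[-1:] + halves[:-1]
--     return [kept + received for kept, received in zip(halves, rotated)]
-- ===== Notes on version B (the rewrite author's own statement) =====
-- stated objective: alternative
-- what changed: Replaced A's single scatter loop that mutates a preallocated accumulator (each element writes its half into its own cell and a branch-selected wraparound neighbor) by three staged whole-list passes: build the halves list once, rotate it right by one with slicing (halves[-1:] + halves[:-1]), and zip-add the two lists; no accumulator, no index writes, no branch.
import Mathlib
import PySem

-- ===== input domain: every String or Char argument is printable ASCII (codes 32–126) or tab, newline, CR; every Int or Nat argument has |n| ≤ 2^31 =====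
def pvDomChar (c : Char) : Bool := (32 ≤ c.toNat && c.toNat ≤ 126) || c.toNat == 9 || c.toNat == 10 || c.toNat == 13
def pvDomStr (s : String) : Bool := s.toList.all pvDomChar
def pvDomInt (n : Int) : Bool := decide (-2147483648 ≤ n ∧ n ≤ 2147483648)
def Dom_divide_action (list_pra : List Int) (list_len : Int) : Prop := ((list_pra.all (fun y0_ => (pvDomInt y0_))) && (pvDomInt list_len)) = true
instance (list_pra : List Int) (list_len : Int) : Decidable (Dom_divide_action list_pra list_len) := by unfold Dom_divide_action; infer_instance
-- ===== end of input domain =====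

-- B replaces A's single scatter loop over a mutated accumulator by three staged
-- whole-list passes: build the halves list, rotate it right by one via slicing,
-- and vector-add the two lists (simpler; same return value).

-- ===== PORT A =====
-- list_pra[i] // 2 as A reads it (Pre_ guarantees the index is in range)
def aHalf (list_pra : List Int) (i : Nat) : Int :=
  PySem.Int.floordiv ((PySem.List.pyGet? list_pra (i : Int)).getD 0) 2

-- one iteration of A's for-loop body (tmp_list indices are always in range)
def stepA (list_pra : List Int) (list_len : Int) (tmp : List Int) (i : Nat) : List Int :=
  let v := aHalf list_pra i
  let t1 := tmp.set i (tmp.getD i 0 + v)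
  if (i : Int) = list_len - 1 then t1.set 0 (t1.getD 0 0 + v)
  else t1.set (i + 1) (t1.getD (i + 1) 0 + v)

def divide_action (list_pra : List Int) (list_len : Int) : List Int :=
  (List.range list_len.toNat).foldl (stepA list_pra list_len)
    (List.replicate list_len.toNat 0)

-- ===== PORT B =====
def divide_action_alt (list_pra : List Int) (list_len : Int) : List Int :=
  let halves := (List.range list_len.toNat).map (fun (i : Nat) =>
    PySem.Int.floordiv ((PySem.List.pyGet? list_pra (i : Int)).getD 0) 2)
  let rotated := PySem.List.slice halves (some (-1)) none
                 ++ PySem.List.slice halves none (some (-1))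
  (halves.zip rotated).map (fun p => p.1 + p.2)

-- ===== PRECONDITION & SPEC =====
-- Python A raises IndexError iff list_len > len(list_pra); for list_len ≤ 0 it returns [].
def Pre_divide_action (list_pra : List Int) (list_len : Int) : Prop :=
  list_len ≤ (list_pra.length : Int)
instance (list_pra : List Int) (list_len : Int) : Decidable (Pre_divide_action list_pra list_len) := by unfold Pre_divide_action; infer_instance
def pvWitness_divide_action : List Int × Int := ([7, -3, 4, 5], 4)

def Spec_divide_action (list_pra : List Int) (list_len : Int) (out : List Int) : Prop := out = divide_action_alt list_pra list_len
instance (list_pra : List Int) (list_len : Int) (out : List Int) : Decidable (Spec_divide_action list_pra list_len out) := by unfold Spec_divide_action; infer_instance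

-- ===== CLAIM (what is proved, stated in full; the proofs are below) =====
def Claim_equal_divide_action : Prop := ∀ (list_pra : List Int) (list_len : Int), Dom_divide_action list_pra list_len → Pre_divide_action list_pra list_len → Spec_divide_action list_pra list_len (divide_action list_pra list_len)

-- ===== LEMMAS AND PROOFS =====

theorem getD_set' (l : List Int) (i j : Nat) (x d : Int) :
    (l.set i x).getD j d = if i = j ∧ j < l.length then x else l.getD j d := by
  simp only [List.getD, List.getElem?_set]
  split_ifs with h1 h2 h3 h4 <;> simp_all <;> omega

theorem stepA_length (list_pra : List Int) (list_len : Int) (tmp : List Int) (i : Nat) :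
    (stepA list_pra list_len tmp i).length = tmp.length := by
  unfold stepA
  split <;> simp

theorem foldA_length (list_pra : List Int) (list_len : Int) (k : Nat) (t : List Int) :
    ((List.range k).foldl (stepA list_pra list_len) t).length = t.length := by
  induction k generalizing t with
  | zero => simp
  | succ k ih => rw [List.range_succ, List.foldl_append]; simp [stepA_length, ih]

-- contribution of the first k iterations to cell j
def contrib (list_pra : List Int) (n k j : Nat) : Int :=
  (if j < k then aHalf list_pra j else 0)
  + (if 0 < j ∧ j ≤ k then aHalf list_pra (j - 1) else 0)
  + (if j = 0 ∧ k = n then aHalf list_pra (n - 1) else 0)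

theorem stepA_getD (list_pra : List Int) (list_len : Int) (tmp : List Int)
    (htmp : tmp.length = list_len.toNat) (k : Nat) (hk : k < list_len.toNat)
    (j : Nat) (hj : j < list_len.toNat) :
    (stepA list_pra list_len tmp k).getD j 0
      = tmp.getD j 0
        + (if j = k then aHalf list_pra k else 0)
        + (if j = (if k = list_len.toNat - 1 then 0 else k + 1)
            then aHalf list_pra k else 0) := by
  have hcond : ((k : Int) = list_len - 1) ↔ (k = list_len.toNat - 1) := by omega
  unfold stepA
  split
  · rename_i h
    have hk' : k = list_len.toNat - 1 := hcond.mp h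
    simp only [getD_set', List.length_set, htmp, if_pos hk']
    clear hcond h
    split_ifs <;>
    first
      | omega
      | ring1
      | (rw [show j = k by omega]) <;> ring1
      | (rw [show k = j by omega]) <;> ring1
      | (rw [show j = k + 1 by omega]) <;> ring1
      | (rw [show j = 0 by omega]) <;> ring1
      | (rw [show (1 + k - 1 : Nat) = k by omega]) <;> ring1
      | (rw [show (1 + k - 1 : Nat) = k by omega])
      | (rw [show list_len.toNat - 1 = 0 by omega]) <;> ring1
      | (rw [show j = k by omega, show k = list_len.toNat - 1 by omega]) <;> ring1
      | (rw [show k = list_len.toNat - 1 by omega]) <;> ring1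
      | (rw [show j = list_len.toNat - 1 by omega]) <;> ring1
      | (rw [show (j - 1 : Nat) = k by omega]) <;> ring1
  · rename_i h
    have hk' : k ≠ list_len.toNat - 1 := fun hh => h (hcond.mpr hh)
    simp only [getD_set', List.length_set, htmp, if_neg hk']
    clear hcond h
    split_ifs <;>
    first
      | omega
      | ring1
      | (rw [show j = k by omega]) <;> ring1
      | (rw [show k = j by omega]) <;> ring1
      | (rw [show j = k + 1 by omega]) <;> ring1
      | (rw [show j = 0 by omega]) <;> ring1
      | (rw [show (1 + k - 1 : Nat) = k by omega]) <;> ring1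
      | (rw [show (1 + k - 1 : Nat) = k by omega])
      | (rw [show list_len.toNat - 1 = 0 by omega]) <;> ring1
      | (rw [show j = k by omega, show k = list_len.toNat - 1 by omega]) <;> ring1
      | (rw [show k = list_len.toNat - 1 by omega]) <;> ring1
      | (rw [show j = list_len.toNat - 1 by omega]) <;> ring1
      | (rw [show (j - 1 : Nat) = k by omega]) <;> ring1

theorem foldA_getD (list_pra : List Int) (list_len : Int) (k : Nat)
    (hk : k ≤ list_len.toNat) (t : List Int) (ht : t.length = list_len.toNat)
    (j : Nat) (hj : j < list_len.toNat) :
    ((List.range k).foldl (stepA list_pra list_len) t).getD j 0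
      = t.getD j 0 + contrib list_pra list_len.toNat k j := by
  induction k generalizing j with
  | zero => simp [contrib]; omega
  | succ k ih =>
    rw [List.range_succ, List.foldl_append, List.foldl_cons, List.foldl_nil]
    have hlen : ((List.range k).foldl (stepA list_pra list_len) t).length
        = list_len.toNat := by
      rw [foldA_length]; exact ht
    rw [stepA_getD list_pra list_len _ hlen k (by omega) j hj, ih (by omega) j hj]
    unfold contrib
    by_cases hlast : k = list_len.toNat - 1 <;>
      simp only [hlast, reduceIte] <;>
      split_ifs <;>
    first
      | omega
      | ring1
      | (rw [show j = k by omega]) <;> ring1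
      | (rw [show k = j by omega]) <;> ring1
      | (rw [show j = k + 1 by omega]) <;> ring1
      | (rw [show j = 0 by omega]) <;> ring1
      | (rw [show (1 + k - 1 : Nat) = k by omega]) <;> ring1
      | (rw [show (1 + k - 1 : Nat) = k by omega])
      | (rw [show list_len.toNat - 1 = 0 by omega]) <;> ring1
      | (rw [show j = k by omega, show k = list_len.toNat - 1 by omega]) <;> ring1
      | (rw [show k = list_len.toNat - 1 by omega]) <;> ring1
      | (rw [show j = list_len.toNat - 1 by omega]) <;> ring1
      | (rw [show (j - 1 : Nat) = k by omega]) <;> ring1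

theorem contrib_final (list_pra : List Int) (n j : Nat) (hn : 0 < n) (hj : j < n) :
    contrib list_pra n n j
      = aHalf list_pra j + aHalf list_pra (if j = 0 then n - 1 else j - 1) := by
  unfold contrib
  by_cases h0 : j = 0 <;> simp [h0, hj] <;> omega

-- ===== VERDICT (by name: the statement is the Claim_ definition above) =====
theorem divide_action_spec : Claim_equal_divide_action := by
  intro list_pra list_len _hdom _hpre
  unfold Spec_divide_action divide_action divide_action_alt
  dsimp only
  by_cases hn : list_len.toNat = 0
  · simp [hn]
  have hn' : 0 < list_len.toNat := by omega
  set n := list_len.toNat with hnn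
  set h := (List.range n).map (fun (i : Nat) =>
    PySem.Int.floordiv ((PySem.List.pyGet? list_pra (i : Int)).getD 0) 2) with hh
  have hhlen : h.length = n := by simp [hh]
  have hhget : ∀ (j : Nat) (hj : j < n), h[j]'(by omega) = aHalf list_pra j := by
    intro j hj
    simp [hh, aHalf]
  have hrot : PySem.List.slice h (some (-1)) none ++ PySem.List.slice h none (some (-1))
      = h.drop (h.length - 1) ++ h.dropLast := by
    rw [PySem.List.slice_from_neg_one, PySem.List.slice_to_neg_one]
  rw [hrot]
  have hrotlen : (h.drop (h.length - 1) ++ h.dropLast).length = n := by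
    simp [hhlen]
  apply List.ext_getElem
  · rw [foldA_length]
    simp [hhlen]
  intro j hj1 hj2
  have hjn : j < n := by
    have := hj1; rw [foldA_length] at this; simpa using this
  have hziplen : (h.zip (h.drop (h.length - 1) ++ h.dropLast)).length = n := by
    simp [hhlen]
  rw [← List.getD_eq_getElem _ 0 hj1]
  rw [foldA_getD list_pra list_len n le_rfl (List.replicate n 0) (by simp [hnn]) j hjn]
  rw [contrib_final list_pra n j hn' hjn]
  simp only [List.getElem_map, List.getElem_zip]
  rw [hhget j hjn]
  have hrget : (h.drop (h.length - 1) ++ h.dropLast)[j]'(by omega)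
      = aHalf list_pra (if j = 0 then n - 1 else j - 1) := by
    by_cases h0 : j = 0
    · subst h0
      rw [List.getElem_append_left (by simp [hhlen]; omega)]
      rw [List.getElem_drop]
      simp only [hhlen]
      rw [hhget (n - 1 + 0) (by omega)]
      simp
    · rw [List.getElem_append_right (by simp [hhlen]; omega)]
      have : (h.dropLast)[j - (h.drop (h.length - 1)).length]'(by
          simp [hhlen]; omega) = h[j - 1]'(by omega) := by
        rw [List.getElem_dropLast]
        congr 1
        simp [hhlen]
        omega
      rw [this, hhget (j - 1) (by omega)]
      simp [h0]
  rw [hrget]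
  simp
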